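-- pv_equiv track=rewrite | github.com/AliMQ98/SR-CLF | src/SymFunctions.py | detect_nested_function_calls
-- ===== SOURCE A (Python) =====
-- def detect_nested_function_calls(expr: str, fn_name: str):
--     """
--     Returns 1 if expr contains nested fn_name(...) inside fn_name(...), else 0.
--
--     Pure string-based scan. Assumes calls look like: fn_name( ... )
--     """
--     expr = expr.replace(" ", "")
--     n = len(expr)
--     fn = fn_name.lower()
--     fn_len = len(fn)
--
--     nested = 0
--     # depth inside current fn call's parentheses (counts parentheses)
--     depth = 0
--     i = 0
--
--     while i < n and not nested:
--         # detect function name at position i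
--         if expr[i:i+fn_len].lower() == fn:
--             # must be a call: next non-space char should be '('
--             j = i + fn_len
--             if j < n and expr[j] == "(":
--                 # if we are already inside a call of the same function => nested
--                 if depth > 0:
--                     nested = 1
--                     break
--                 depth = 1  # enter first level of this fn's parentheses
--                 i = j  # move to '('
--         elif expr[i] == "(" and depth > 0:
--             depth += 1
--         elif expr[i] == ")" and depth > 0:
--             depth -= 1
--
--         i += 1
--
--     return nested
-- ===== SOURCE B (Python) =====
-- def detect_nested_function_calls(expr: str, fn_name: str):
--     """
--     Returns 1 if expr contains nested fn_name(...) inside fn_name(...), else 0.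
--
--     find/region decomposition: locate each call start with str.find on the
--     lowercased, space-stripped text, then scan only that call's region.
--     """
--     t = expr.replace(" ", "").lower()
--     fn = fn_name.lower()
--     call = fn + "("
--     n = len(t)
--     p = t.find(call)
--     while p != -1:
--         i = p + len(call)
--         depth = 1
--         while i < n:
--             if t[i:i + len(fn)] == fn:
--                 if t[i + len(fn):i + len(call)] == "(":
--                     return 1
--             elif t[i] == "(":
--                 depth += 1
--             elif t[i] == ")":
--                 depth -= 1
--                 if depth == 0:
--                     break
--             i += 1
--         if i >= n:
--             return 0
--         p = t.find(call, i + 1)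
--     return 0
-- ===== Notes on version B (the rewrite author's own statement) =====
-- stated objective: faster
-- what changed: Replaces A's Python-level character-by-character scan with a depth flag by a find/region decomposition: str.find on the lowercased space-stripped text locates each call start, a bracket-counting scan bounds only that call's region, and the search resumes after the region.
import Mathlib
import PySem

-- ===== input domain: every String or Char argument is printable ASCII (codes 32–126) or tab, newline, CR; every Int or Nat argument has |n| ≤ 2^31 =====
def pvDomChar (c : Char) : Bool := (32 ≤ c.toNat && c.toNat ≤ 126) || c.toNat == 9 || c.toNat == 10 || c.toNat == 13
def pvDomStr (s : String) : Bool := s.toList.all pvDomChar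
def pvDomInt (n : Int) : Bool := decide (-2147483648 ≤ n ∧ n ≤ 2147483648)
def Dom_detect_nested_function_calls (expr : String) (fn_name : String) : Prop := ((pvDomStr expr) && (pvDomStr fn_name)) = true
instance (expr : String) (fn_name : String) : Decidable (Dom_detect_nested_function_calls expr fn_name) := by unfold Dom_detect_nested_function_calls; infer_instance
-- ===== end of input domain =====

-- B replaces A's single depth-flag scan by a find/region decomposition: str.find locates
-- each call start, a bracket scan bounds its region (measured faster on large inputs).

-- ===== PORT A =====
-- A's while loop over (i, depth).  expr[i:i+fn_len] with 0 ≤ i is (cs.drop i).take fn_len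
-- (exact: Python slices clamp past the end exactly as drop/take do); .lower() is a map of
-- PySem.Chars.lowerChar.  Python's depth is an int but is only incremented/decremented
-- under a `depth > 0` guard, so it stays ≥ 0 and Nat with truncated `- 1` is exact.
def pvA_loop (cs : List Char) (fn : List Char) (i : Nat) (depth : Nat) : Int :=
  if h : i < cs.length then
    if List.map PySem.Chars.lowerChar ((cs.drop i).take fn.length) = fn then
      if i + fn.length < cs.length ∧ cs.getD (i + fn.length) ' ' = '(' then
        if 0 < depth then 1
        else pvA_loop cs fn (i + fn.length + 1) 1
      else pvA_loop cs fn (i + 1) depth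
    else if cs.getD i ' ' = '(' ∧ 0 < depth then
      pvA_loop cs fn (i + 1) (depth + 1)
    else if cs.getD i ' ' = ')' ∧ 0 < depth then
      pvA_loop cs fn (i + 1) (depth - 1)
    else pvA_loop cs fn (i + 1) depth
  else 0
  termination_by cs.length - i
  decreasing_by
    · exact Nat.sub_lt_sub_left h (Nat.lt_succ_of_le (Nat.le_add_right i fn.length))
    · exact Nat.sub_lt_sub_left h (Nat.lt_succ_self i)
    · exact Nat.sub_lt_sub_left h (Nat.lt_succ_self i)
    · exact Nat.sub_lt_sub_left h (Nat.lt_succ_self i)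
    · exact Nat.sub_lt_sub_left h (Nat.lt_succ_self i)

def detect_nested_function_calls (expr : String) (fn_name : String) : Int :=
  pvA_loop (PySem.Str.replace expr " " "").toList (PySem.Str.lower fn_name).toList 0 0

-- ===== PORT B =====
-- B's inner region scan: Sum.inl () encodes `return 1`, Sum.inr i the loop exit at index i
-- (break on the matching close paren, or i ≥ len at the loop test).
-- t[i:i+len(fn)] is (t.drop i).take fn.length; t[i+len(fn):i+len(fn)+1] is a take 1.
def pvB_inner (t : List Char) (fn : List Char) (i : Nat) (depth : Nat) : Sum Unit Nat :=
  if h : i < t.length then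
    if (t.drop i).take fn.length = fn then
      if (t.drop (i + fn.length)).take 1 = ['('] then Sum.inl ()
      else pvB_inner t fn (i + 1) depth
    else if t.getD i ' ' = '(' then pvB_inner t fn (i + 1) (depth + 1)
    else if t.getD i ' ' = ')' then
      if depth - 1 = 0 then Sum.inr i
      else pvB_inner t fn (i + 1) (depth - 1)
    else pvB_inner t fn (i + 1) depth
  else Sum.inr i
  termination_by t.length - i
  decreasing_by
    · exact Nat.sub_lt_sub_left h (Nat.lt_succ_self i)
    · exact Nat.sub_lt_sub_left h (Nat.lt_succ_self i)
    · exact Nat.sub_lt_sub_left h (Nat.lt_succ_self i)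
    · exact Nat.sub_lt_sub_left h (Nat.lt_succ_self i)

-- needed by pvB_outer's termination: the inner loop never moves its index backwards
theorem pvB_inner_ge (t fn : List Char) (i depth j : Nat)
    (h : pvB_inner t fn i depth = Sum.inr j) : i ≤ j := by
  fun_induction pvB_inner t fn i depth <;> simp_all <;> omega

-- needed by pvB_outer's termination: str.find with a start past the end returns -1
theorem findFrom_past (t sub : List Char) (q : Nat) (h : t.length < q) :
    PySem.Chars.findFrom t sub (q : Int) none = -1 := by
  unfold PySem.Chars.findFrom
  have h0 : ¬ ((q : Int) < 0) := by omega
  simp only [h0, if_false]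
  rw [if_pos (by exact_mod_cast h)]

-- B's outer loop: p = t.find(call, q); while p != -1 … (q is the current search start).
def pvB_outer (t : List Char) (fn : List Char) (q : Nat) : Int :=
  if hp : PySem.Chars.findFrom t (fn ++ ['(']) (q : Int) none = -1 then 0
  else
    match hi : pvB_inner t fn ((PySem.Chars.findFrom t (fn ++ ['(']) (q : Int) none).toNat + fn.length + 1) 1 with
    | Sum.inl () => 1
    | Sum.inr i => if hin : i < t.length then pvB_outer t fn (i + 1) else 0
  termination_by t.length - q
  decreasing_by
    have hj := pvB_inner_ge _ _ _ _ _ hi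
    have hq : q ≤ (PySem.Chars.findFrom t (fn ++ ['(']) (q : Int) none).toNat := by
      by_cases hql : q ≤ t.length
      · have h1 := (PySem.Chars.findFrom_natCast_spec t (fn ++ ['(']) q hql hp).1
        have h2 := Int.toNat_le_toNat h1
        rwa [Int.toNat_natCast] at h2
      · exact absurd (findFrom_past t (fn ++ ['(']) q (Nat.lt_of_not_le hql)) hp
    exact Nat.sub_lt_sub_left
      (Nat.lt_of_le_of_lt (Nat.le_trans hq (Nat.le_trans (Nat.le_trans (Nat.le_add_right _ fn.length) (Nat.le_succ _)) hj)) hin)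
      (Nat.lt_succ_of_le (Nat.le_trans hq (Nat.le_trans (Nat.le_trans (Nat.le_add_right _ fn.length) (Nat.le_succ _)) hj)))

def detect_nested_function_calls_alt (expr : String) (fn_name : String) : Int :=
  pvB_outer (PySem.Str.lower (PySem.Str.replace expr " " "")).toList
    (PySem.Str.lower fn_name).toList 0

-- ===== PRECONDITION & SPEC =====
def Spec_detect_nested_function_calls (expr : String) (fn_name : String) (out : Int) : Prop := out = detect_nested_function_calls_alt expr fn_name
instance (expr : String) (fn_name : String) (out : Int) : Decidable (Spec_detect_nested_function_calls expr fn_name out) := by unfold Spec_detect_nested_function_calls; infer_instance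

-- ===== CLAIM (what is proved, stated in full; the proofs are below) =====
def Claim_equal_detect_nested_function_calls : Prop := ∀ (expr : String) (fn_name : String), Dom_detect_nested_function_calls expr fn_name → Spec_detect_nested_function_calls expr fn_name (detect_nested_function_calls expr fn_name)

-- ===== LEMMAS AND PROOFS =====

theorem charOfNat_toNat (n : Nat) (h : n < 55296) : (Char.ofNat n).toNat = n := by
  unfold Char.ofNat
  rw [dif_pos (by exact Or.inl (by exact_mod_cast h))]
  rfl

-- lowering a character cannot create or destroy a non-letter such as '(' or ')'
theorem lowerChar_eq_iff (c p : Char) (hp : p.toNat < 97) (hp' : PySem.Chars.isupper p = false) :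
    (PySem.Chars.lowerChar c = p ↔ c = p) := by
  constructor
  · intro h
    unfold PySem.Chars.lowerChar at h
    split at h
    · next hu =>
        exfalso
        unfold PySem.Chars.isupper at hu
        simp at hu
        obtain ⟨h1, h2⟩ := hu
        have h1' : 65 ≤ c.toNat := by exact_mod_cast h1
        have h2' : c.toNat ≤ 90 := by exact_mod_cast h2
        have := congrArg Char.toNat h
        rw [charOfNat_toNat _ (by omega)] at this
        omega
    · exact h
  · intro h
    subst h
    unfold PySem.Chars.lowerChar
    rw [hp']
    simp

theorem getD_map_lower (cs : List Char) (i : Nat) (hi : i < cs.length) (p : Char)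
    (hp : p.toNat < 97) (hp' : PySem.Chars.isupper p = false) :
    ((cs.map PySem.Chars.lowerChar).getD i ' ' = p ↔ cs.getD i ' ' = p) := by
  rw [List.getD_eq_getElem _ _ (by simpa using hi), List.getD_eq_getElem _ _ hi,
    List.getElem_map]
  exact lowerChar_eq_iff _ _ hp hp'

theorem take_one_drop_eq (l : List Char) (k : Nat) :
    (l.drop k).take 1 = ['('] ↔ k < l.length ∧ l.getD k ' ' = '(' := by
  by_cases hk : k < l.length
  · rw [List.drop_eq_getElem_cons hk, List.take_succ_cons, List.take_zero,
      List.getD_eq_getElem _ _ hk]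
    simp [hk]
  · rw [List.drop_eq_nil_of_le (by omega)]
    simp [hk]

-- "a call of fn starts at i in t": the key predicate behind str.find(fn + "(", …)
def callAt (t fn : List Char) (i : Nat) : Prop := (fn ++ ['(']) <+: t.drop i

theorem callAt_iff (t fn : List Char) (i : Nat) :
    callAt t fn i ↔
      ((t.drop i).take fn.length = fn ∧ (t.drop (i + fn.length)).take 1 = ['(']) := by
  unfold callAt
  rw [List.prefix_iff_eq_take]
  constructor
  · intro h
    have hlen : fn.length + 1 + i ≤ t.length := by
      have hlh := congrArg List.length h
      simp only [List.length_append, List.length_take, List.length_cons,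
        List.length_nil, List.length_drop] at hlh
      omega
    have h' : (t.drop i).take (fn.length + 1) = fn ++ ['('] := by
      have := h.symm
      simpa using this
    rw [List.take_add, List.drop_drop] at h'
    have hl1 : ((t.drop i).take fn.length).length = fn.length := by
      simp only [List.length_take, List.length_drop]
      omega
    obtain ⟨e1, e2⟩ := List.append_inj h' hl1
    exact ⟨e1, e2⟩
  · rintro ⟨h1, h2⟩
    have h3 : (t.drop i).take (fn.length + 1) = fn ++ ['('] := by
      rw [List.take_add, List.drop_drop, h1, h2]
    simp [h3]

-- str.find returns its start when the pattern matches there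
theorem findFrom_at (t sub : List Char) (q : Nat) (hq : q ≤ t.length)
    (hpre : sub <+: t.drop q) : PySem.Chars.findFrom t sub (q : Int) none = (q : Int) := by
  have hne : PySem.Chars.findFrom t sub (q : Int) none ≠ -1 := by
    rw [ne_eq, PySem.Chars.findFrom_natCast_eq_neg_one_iff t sub q hq]
    simp [hpre.isInfix]
  obtain ⟨hge, hpre', hmin⟩ := PySem.Chars.findFrom_natCast_spec t sub q hq hne
  by_cases h : q < (PySem.Chars.findFrom t sub (q : Int) none).toNat
  · exact absurd hpre (hmin q le_rfl h)
  · omega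

-- str.find skips a start position where the pattern does not match
theorem findFrom_succ (t sub : List Char) (q : Nat) (hq : q < t.length)
    (hnp : ¬ sub <+: t.drop q) :
    PySem.Chars.findFrom t sub (q : Int) none = PySem.Chars.findFrom t sub ((q : Nat) + 1 : Nat) none := by
  have hq1 : q + 1 ≤ t.length := by omega
  have hdrop : t.drop q = t[q] :: t.drop (q + 1) := List.drop_eq_getElem_cons hq
  have hinfix : sub <:+: t.drop q ↔ sub <:+: t.drop (q + 1) := by
    rw [hdrop, List.infix_cons_iff, ← hdrop]
    constructor
    · rintro (h | h)
      · exact absurd h hnp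
      · exact h
    · exact Or.inr
  by_cases h1 : PySem.Chars.findFrom t sub ((q + 1 : Nat) : Int) none = -1
  · rw [h1]
    rw [PySem.Chars.findFrom_natCast_eq_neg_one_iff t sub q (by omega)]
    rw [PySem.Chars.findFrom_natCast_eq_neg_one_iff t sub (q + 1) hq1] at h1
    rw [hinfix]; exact h1
  · obtain ⟨rge, rpre, rmin⟩ := PySem.Chars.findFrom_natCast_spec t sub (q + 1) hq1 h1
    have hsinf : sub <:+: t.drop (q + 1) := by
      have hsfx : t.drop (PySem.Chars.findFrom t sub ((q + 1 : Nat) : Int) none).toNat <:+ t.drop (q + 1) := by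
        have hge' : q + 1 ≤ (PySem.Chars.findFrom t sub ((q + 1 : Nat) : Int) none).toNat := by
          omega
        rw [show (PySem.Chars.findFrom t sub ((q + 1 : Nat) : Int) none).toNat
            = (q + 1) + ((PySem.Chars.findFrom t sub ((q + 1 : Nat) : Int) none).toNat - (q + 1)) by omega,
          ← List.drop_drop]
        exact List.drop_suffix _ _
      exact rpre.isInfix.trans hsfx.isInfix
    have hne : PySem.Chars.findFrom t sub (q : Int) none ≠ -1 := by
      rw [ne_eq, PySem.Chars.findFrom_natCast_eq_neg_one_iff t sub q (by omega), hinfix]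
      simp [hsinf]
    obtain ⟨sge, spre, smin⟩ := PySem.Chars.findFrom_natCast_spec t sub q (by omega) hne
    have hs1 : q + 1 ≤ (PySem.Chars.findFrom t sub (q : Int) none).toNat := by
      rcases Nat.lt_or_ge q (PySem.Chars.findFrom t sub (q : Int) none).toNat with h | h
      · omega
      · have : (PySem.Chars.findFrom t sub (q : Int) none).toNat = q := by omega
        rw [this] at spre
        exact absurd spre hnp
    have hle1 : ¬ ((PySem.Chars.findFrom t sub (q : Int) none).toNat
        < (PySem.Chars.findFrom t sub ((q + 1 : Nat) : Int) none).toNat) := by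
      intro hlt
      exact rmin _ hs1 hlt spre
    have hle2 : ¬ ((PySem.Chars.findFrom t sub ((q + 1 : Nat) : Int) none).toNat
        < (PySem.Chars.findFrom t sub (q : Int) none).toNat) := by
      intro hlt
      exact smin _ (by omega) hlt rpre
    omega

-- inner simulation: at depth > 0, A's scan is B's region scan followed (on break) by
-- A's continuation at depth 0
theorem inner_sim (cs fn : List Char) (i depth : Nat) :
    0 < depth →
    pvA_loop cs fn i depth =
      (match pvB_inner (cs.map PySem.Chars.lowerChar) fn i depth with
        | Sum.inl _ => 1
        | Sum.inr j => if j < cs.length then pvA_loop cs fn (j + 1) 0 else 0) := by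
  fun_induction pvA_loop cs fn i depth with
  | case1 i depth h hm hp hd => -- match, paren, depth>0: A returns 1
    intro _
    rw [pvB_inner]
    rw [dif_pos (by simpa using h)]
    rw [if_pos (by rw [← List.map_drop, ← List.map_take]; exact hm)]
    rw [if_pos ?_]
    · rw [take_one_drop_eq]
      simp only [List.length_map]
      exact ⟨hp.1, by rw [getD_map_lower cs _ hp.1 '(' (by decide) (by decide)]; exact hp.2⟩
  | case2 i depth h hm hp hd ih => -- match, paren, depth = 0 (contradiction with 0 < depth)
    intro hd'; omega
  | case3 i depth h hm hp ih => -- match, no paren: step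
    intro hd'
    rw [pvB_inner]
    rw [dif_pos (by simpa using h)]
    rw [if_pos (by rw [← List.map_drop, ← List.map_take]; exact hm)]
    rw [if_neg ?_]
    · exact ih hd'
    · intro hc
      rw [take_one_drop_eq] at hc
      simp only [List.length_map] at hc
      exact hp ⟨hc.1, (getD_map_lower cs _ hc.1 '(' (by decide) (by decide)).1 hc.2⟩
  | case4 i depth h hm hop ih => -- '(' at depth>0
    intro hd'
    rw [pvB_inner]
    rw [dif_pos (by simpa using h)]
    rw [if_neg (by rw [← List.map_drop, ← List.map_take]; exact fun hc => hm hc)]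
    rw [if_pos (by rw [getD_map_lower cs _ h '(' (by decide) (by decide)]; exact hop.1)]
    exact ih (by omega)
  | case5 i depth h hm hop hcp ih => -- ')' at depth>0
    intro hd'
    rw [pvB_inner]
    rw [dif_pos (by simpa using h)]
    rw [if_neg (by rw [← List.map_drop, ← List.map_take]; exact fun hc => hm hc)]
    rw [if_neg (by
      rw [getD_map_lower cs _ h '(' (by decide) (by decide)]
      intro hc; exact absurd ⟨hc, hd'⟩ hop)]
    rw [if_pos (by rw [getD_map_lower cs _ h ')' (by decide) (by decide)]; exact hcp.1)]
    by_cases hd1 : depth - 1 = 0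
    · rw [if_pos hd1]
      have : depth = 1 := by omega
      subst this
      simp [h]
    · rw [if_neg hd1]
      exact ih (by omega)
  | case6 i depth h hm hop hcp ih => -- other character
    intro hd'
    rw [pvB_inner]
    rw [dif_pos (by simpa using h)]
    rw [if_neg (by rw [← List.map_drop, ← List.map_take]; exact fun hc => hm hc)]
    rw [if_neg (by
      rw [getD_map_lower cs _ h '(' (by decide) (by decide)]
      intro hc; exact absurd ⟨hc, hd'⟩ hop)]
    rw [if_neg (by
      rw [getD_map_lower cs _ h ')' (by decide) (by decide)]
      intro hc; exact absurd ⟨hc, hd'⟩ hcp)]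
    exact ih hd'
  | case7 i depth h => -- i ≥ n
    intro _
    rw [pvB_inner]
    rw [dif_neg (by simpa using h)]
    simp [h]

-- outer simulation: A's depth-0 scan from q is B's find/region loop from q
theorem outer_sim (cs fn : List Char) (k : Nat) :
    ∀ q, q ≤ cs.length → cs.length - q ≤ k →
      pvB_outer (cs.map PySem.Chars.lowerChar) fn q = pvA_loop cs fn q 0 := by
  induction k with
  | zero =>
    intro q hq hk
    have hqn : q = cs.length := by omega
    subst hqn
    rw [pvB_outer, pvA_loop]
    rw [dif_pos ?_, dif_neg (by omega)]
    rw [PySem.Chars.findFrom_natCast_eq_neg_one_iff _ _ _ (by simp)]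
    rw [List.drop_eq_nil_of_le (by simp)]
    simp
  | succ k ih =>
    intro q hq hk
    by_cases hqn : q = cs.length
    · subst hqn
      rw [pvB_outer, pvA_loop]
      rw [dif_pos ?_, dif_neg (by omega)]
      rw [PySem.Chars.findFrom_natCast_eq_neg_one_iff _ _ _ (by simp)]
      rw [List.drop_eq_nil_of_le (by simp)]
      simp
    · have hqlt : q < cs.length := by omega
      set t := cs.map PySem.Chars.lowerChar with ht
      have htl : t.length = cs.length := by simp [ht]
      by_cases hcall : callAt t fn q
      · -- a call starts at q
        obtain ⟨hm, hp1⟩ := (callAt_iff t fn q).1 hcall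
        have hfind : PySem.Chars.findFrom t (fn ++ ['(']) (q : Int) none = (q : Int) :=
          findFrom_at t _ q (by omega) hcall
        rw [pvB_outer, hfind]
        rw [dif_neg (by omega)]
        have hAm : List.map PySem.Chars.lowerChar ((cs.drop q).take fn.length) = fn := by
          rw [← List.map_drop, ← List.map_take] at hm; exact hm
        have hp1' := (take_one_drop_eq t (q + fn.length)).1 hp1
        have hApar : q + fn.length < cs.length ∧ cs.getD (q + fn.length) ' ' = '(' := by
          refine ⟨by omega, ?_⟩
          rw [← getD_map_lower cs _ (by omega) '(' (by decide) (by decide)]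
          exact hp1'.2
        rw [pvA_loop, dif_pos hqlt, if_pos hAm, if_pos hApar, if_neg (by omega)]
        rw [inner_sim cs fn (q + fn.length + 1) 1 (by omega)]
        have htq : ((q : Int)).toNat = q := by omega
        rw [htq]
        cases hinner : pvB_inner t fn (q + fn.length + 1) 1 with
        | inl u => cases u; rfl
        | inr j =>
          have hj : q + fn.length + 1 ≤ j := pvB_inner_ge _ _ _ _ _ hinner
          show (if _hin : j < t.length then pvB_outer t fn (j + 1) else 0)
              = if j < cs.length then pvA_loop cs fn (j + 1) 0 else 0
          by_cases hjn : j < cs.length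
          · rw [dif_pos (show j < t.length by omega), if_pos hjn]
            exact ih (j + 1) (by omega) (by omega)
          · rw [dif_neg (show ¬ j < t.length by omega), if_neg hjn]
      · -- no call at q: both sides step to q+1
        have hstepA : pvA_loop cs fn q 0 = pvA_loop cs fn (q + 1) 0 := by
          rw [pvA_loop, dif_pos hqlt]
          by_cases hm : List.map PySem.Chars.lowerChar ((cs.drop q).take fn.length) = fn
          · rw [if_pos hm, if_neg ?_]
            intro hpar
            apply hcall
            rw [callAt_iff]
            refine ⟨by rw [← List.map_drop, ← List.map_take]; exact hm, ?_⟩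
            rw [take_one_drop_eq]
            refine ⟨by simpa [htl] using hpar.1, ?_⟩
            rw [getD_map_lower cs _ hpar.1 '(' (by decide) (by decide)]
            exact hpar.2
          · rw [if_neg hm, if_neg (by simp), if_neg (by simp)]
        have hnp : ¬ (fn ++ ['(']) <+: t.drop q := hcall
        have hstepB : pvB_outer t fn q = pvB_outer t fn (q + 1) := by
          rw [pvB_outer]
          conv_rhs => rw [pvB_outer]
          rw [findFrom_succ t _ q (by omega) hnp]
        rw [hstepB, hstepA]
        exact ih (q + 1) (by omega) (by omega)

-- ===== VERDICT (by name: the statement is the Claim_ definition above) =====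
theorem detect_nested_function_calls_spec : Claim_equal_detect_nested_function_calls := by
  intro expr fn_name _
  unfold Spec_detect_nested_function_calls
  unfold detect_nested_function_calls detect_nested_function_calls_alt
  have hlow : (PySem.Str.lower (PySem.Str.replace expr " " "")).toList
      = (PySem.Str.replace expr " " "").toList.map PySem.Chars.lowerChar := by
    simp [pysem]
    rfl
  rw [hlow]
  exact (outer_sim (PySem.Str.replace expr " " "").toList (PySem.Str.lower fn_name).toList
    ((PySem.Str.replace expr " " "").toList.length) 0 (by omega) (by omega)).symm
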